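-- pv_equiv track=rewrite | github.com/MetalTurtle18/advent-of-code | 2022/day_01/code.py | part1
-- ===== SOURCE A (Python) =====
-- def part1(data):
--     elves = [0]
--     j = 0
--     for i in data:
--         if i == '':
--             j += 1
--             elves.append(0)
--         else:
--             elves[j] += int(i)
--     return max(elves)
-- ===== SOURCE B (Python) =====
-- def part1(data):
--     # Group-at-a-time: scan for the next blank with list.index, sum each
--     # group in one shot, keep only a running best (None until first group).
--     best = None
--     rest = data
--     while True:
--         try:
--             k = rest.index('')
--         except ValueError:
--             s = sum(int(x) for x in rest)
--             return s if best is None else max(best, s)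
--         s = sum(int(x) for x in rest[:k])
--         best = s if best is None else max(best, s)
--         rest = rest[k + 1:]
-- ===== Notes on version B (the rewrite author's own statement) =====
-- stated objective: alternative
-- what changed: Instead of growing a list of per-elf sums indexed by a counter and taking max at the end, B scans for blank-line boundaries with list.index, sums each group in one shot, and keeps only a running best scalar (None before the first group).
import Mathlib
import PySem

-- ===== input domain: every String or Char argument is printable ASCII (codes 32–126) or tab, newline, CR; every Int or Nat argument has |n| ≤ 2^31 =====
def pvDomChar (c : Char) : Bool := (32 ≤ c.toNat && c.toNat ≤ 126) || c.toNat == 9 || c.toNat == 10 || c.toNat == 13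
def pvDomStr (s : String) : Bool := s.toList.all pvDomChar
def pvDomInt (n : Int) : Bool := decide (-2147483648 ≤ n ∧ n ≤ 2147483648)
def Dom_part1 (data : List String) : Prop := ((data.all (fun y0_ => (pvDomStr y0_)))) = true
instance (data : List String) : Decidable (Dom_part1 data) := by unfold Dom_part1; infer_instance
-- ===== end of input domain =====

-- B replaces A's grow-a-list-of-elf-sums-then-max with a boundary scan (list.index for the
-- next blank line), summing each group in one shot and keeping only a running best scalar.


-- ===== PORT A =====
-- int(x); on Pre_ inputs ofStr? is some, so getD 0 is never the raising case
def pyInt (x : String) : Int := (PySem.Int.ofStr? x).getD 0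

def part1 (data : List String) : Int :=
  -- elves = [0]; j = 0; for i in data: …
  let st := data.foldl (fun (st : List Int × Nat) i =>
      if i = "" then (st.1 ++ [0], st.2 + 1)                       -- j += 1; elves.append(0)
      else (st.1.set st.2 (st.1.getD st.2 0 + pyInt i), st.2))     -- elves[j] += int(i)
    ([0], 0)
  -- max(elves); elves is always nonempty so max() cannot raise and getD 0 is never taken
  (PySem.List.max? st.1 (fun x => x)).getD 0

-- ===== PORT B =====
-- the while-loop of Source B: state (best, rest)
def part1Go (best : Option Int) (rest : List String) : Int :=
  match h : PySem.List.index? rest "" with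
  | none =>                                                        -- rest.index('') raises ValueError
      let s := (rest.map pyInt).sum                                -- s = sum(int(x) for x in rest)
      match best with
      | none => s                                                  -- return s
      | some b => max b s                                          -- return max(best, s)
  | some k =>
      let s := ((PySem.List.slice rest none (some (k : Int))).map pyInt).sum   -- sum over rest[:k]
      let best' : Option Int := match best with
        | none => some s
        | some b => some (max b s)
      part1Go best' (PySem.List.slice rest (some ((k : Int) + 1)) none)        -- rest = rest[k+1:]
termination_by rest.length
decreasing_by
  obtain ⟨hk, -, -⟩ := PySem.List.getElem_of_index?_eq_some h
  have : ((k : Int) + 1) = ((k + 1 : Nat) : Int) := by push_cast; ring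
  rw [this, PySem.List.slice_from_natCast, List.length_drop]
  omega

def part1_alt (data : List String) : Int := part1Go none data

-- ===== PRECONDITION & SPEC =====
-- Pre_: every non-blank line parses as a Python int; elsewhere A (and B) raise ValueError in int()
def Pre_part1 (data : List String) : Prop :=
  ∀ s ∈ data, s ≠ "" → (PySem.Int.ofStr? s).isSome
instance (data : List String) : Decidable (Pre_part1 data) := by unfold Pre_part1; infer_instance

def pvWitness_part1 : List String := ["1000", "2000", "", "4000", "", " -5 "]

def Spec_part1 (data : List String) (out : Int) : Prop := out = part1_alt data
instance (data : List String) (out : Int) : Decidable (Spec_part1 data out) := by unfold Spec_part1; infer_instance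

-- ===== CLAIM (what is proved, stated in full; the proofs are below) =====
def Claim_equal_part1 : Prop := ∀ (data : List String), Dom_part1 data → Pre_part1 data → Spec_part1 data (part1 data)

-- ===== LEMMAS AND PROOFS =====

-- the list of per-group sums (phantom 0 groups included), seeded with running sum c
def run (c : Int) : List String → List Int
  | [] => [c]
  | i :: t => if i = "" then c :: run 0 t else run (c + pyInt i) t

lemma run_ne_nil (c : Int) (l : List String) : run c l ≠ [] := by
  induction l generalizing c with
  | nil => simp [run]
  | cons i t ih => by_cases h : i = "" <;> simp [run, h, ih]

-- A's loop builds exactly pre ++ run c data when started from (pre ++ [c], pre.length)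
lemma loopA (data : List String) : ∀ (pre : List Int) (c : Int),
    (data.foldl (fun (st : List Int × Nat) i =>
      if i = "" then (st.1 ++ [0], st.2 + 1)
      else (st.1.set st.2 (st.1.getD st.2 0 + pyInt i), st.2))
      (pre ++ [c], pre.length)) = (pre ++ run c data, pre.length + (run c data).length - 1) := by
  induction data with
  | nil => intro pre c; simp [run]
  | cons i t ih =>
    intro pre c
    by_cases h : i = ""
    · have := ih (pre ++ [c]) 0
      simp only [List.foldl_cons, h, reduceIte, List.append_assoc] at this ⊢
      rw [show (pre ++ [c]).length = pre.length + 1 from by simp] at this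
      rw [this]
      simp only [run, reduceIte, List.singleton_append, List.length_cons, Prod.mk.injEq]
      exact ⟨trivial, by omega⟩
    · have hset : (pre ++ [c]).set pre.length ((pre ++ [c]).getD pre.length 0 + pyInt i)
          = pre ++ [c + pyInt i] := by
        have hg : (pre ++ [c]).getD pre.length 0 = c := by
          simp [List.getD_eq_getElem?_getD]
        rw [hg, List.set_append]
        simp
      simp only [List.foldl_cons, h, if_false]
      rw [hset, ih pre (c + pyInt i)]
      simp only [run, if_neg h]

-- Python max(xs) on a nonempty list is the running-max fold
def maxList : List Int → Int
  | [] => 0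
  | x :: t => t.foldl max x

lemma part1_eq_maxList (data : List String) : part1 data = maxList (run 0 data) := by
  have h := loopA data [] 0
  simp only [List.nil_append, List.length_nil] at h
  unfold part1
  rw [h]
  cases hr : run 0 data with
  | nil => exact absurd hr (run_ne_nil 0 data)
  | cons a b => simp [PySem.List.max?_id_cons, maxList]

-- if no blank line, run c l = [c + total sum]
lemma run_no_blank (l : List String) (hnb : "" ∉ l) (c : Int) :
    run c l = [c + (l.map pyInt).sum] := by
  induction l generalizing c with
  | nil => simp [run]
  | cons i t ih =>
    have hi : i ≠ "" := fun h => hnb (h ▸ List.mem_cons_self ..)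
    have ht : "" ∉ t := fun h => hnb (List.mem_cons_of_mem _ h)
    simp only [run, if_neg hi, ih ht, List.map_cons, List.sum_cons]
    ring_nf

lemma run_split (pre suf : List String) (hnb : "" ∉ pre) (c : Int) :
    run c (pre ++ "" :: suf) = (c + (pre.map pyInt).sum) :: run 0 suf := by
  induction pre generalizing c with
  | nil => simp [run]
  | cons i t ih =>
    have hi : i ≠ "" := fun h => hnb (h ▸ List.mem_cons_self ..)
    have ht : "" ∉ t := fun h => hnb (List.mem_cons_of_mem _ h)
    simp only [List.cons_append, run, if_neg hi, ih ht, List.map_cons, List.sum_cons]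
    ring_nf

lemma part1Go_eq (n : Nat) : ∀ (data : List String), data.length ≤ n → ∀ (best : Option Int),
    part1Go best data = (match best with
      | none => maxList (run 0 data)
      | some b => (run 0 data).foldl max b) := by
  induction n with
  | zero =>
    intro data hlen best
    have : data = [] := List.eq_nil_of_length_eq_zero (Nat.le_zero.mp hlen)
    subst this
    rw [part1Go]
    simp [run, maxList]
  | succ m ih =>
    intro data hlen best
    rw [part1Go]
    split
    · rename_i hidx
      have hnb : "" ∉ data := (PySem.List.index?_eq_none_iff data "").mp hidx
      rw [run_no_blank data hnb 0]
      cases best <;> simp [maxList]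
    · rename_i k hidx
      obtain ⟨pre, suf, hdata, hlenpre, hnb⟩ := (PySem.List.index?_eq_some_iff data "" k).mp hidx
      have hk1 : ((k : Int) + 1) = ((k + 1 : Nat) : Int) := by push_cast; ring
      have hslice1 : PySem.List.slice data none (some (k : Int)) = pre := by
        rw [PySem.List.slice_to_natCast, hdata, ← hlenpre, List.take_left]
      have hslice2 : PySem.List.slice data (some ((k : Int) + 1)) none = suf := by
        rw [hk1, PySem.List.slice_from_natCast, hdata, ← hlenpre]
        rw [show pre.length + 1 = (pre ++ [("" : String)]).length from by simp]
        rw [show pre ++ "" :: suf = (pre ++ [("" : String)]) ++ suf from by simp]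
        exact List.drop_left
      have hsuf : suf.length ≤ m := by
        have : data.length = pre.length + 1 + suf.length := by simp [hdata]; omega
        omega
      rw [hslice1, hslice2, ih suf hsuf, hdata, run_split pre suf hnb 0]
      cases best <;> simp [maxList]

-- ===== VERDICT (by name: the statement is the Claim_ definition above) =====
theorem part1_spec : Claim_equal_part1 := by
  intro data _ _
  unfold Spec_part1 part1_alt
  rw [part1_eq_maxList, part1Go_eq data.length data le_rfl none]
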